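-- pv_equiv track=rewrite | github.com/pace-noge/daily-coding-problem | problem_42.py | adds_up_to
-- ===== SOURCE A (Python) =====
-- from typing import List
--
-- def adds_up_to(s: List[int], k: int):
--     s = list(filter(lambda x: x < k, s))
--     s.sort(reverse=True)
--     subs = []
--     for i in range(len(s)):
--
--         if sum(subs + [s[i]]) < k:            subs.append(s[i])
--         elif sum(subs + [s[i]]) > k:
--             continue
--         elif sum(subs + [s[i]]) == k:
--             subs.append(s[i])
--             return subs
--     return None
-- ===== SOURCE B (Python) =====
-- def adds_up_to(s, k):
--     # selection-based: repeatedly extract the maximum from an unsorted pool,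
--     # tracking the remaining target; no sort, no accumulator re-summing
--     pool = [x for x in s if x < k]
--     r = k
--     out = []
--     while pool:
--         x = max(pool)
--         pool.remove(x)
--         if x > r:
--             continue
--         if x == r:
--             out.append(x)
--             return out
--         out.append(x)
--         r -= x
--     return None
-- ===== Notes on version B (the rewrite author's own statement) =====
-- stated objective: alternative
-- what changed: B never sorts: it repeatedly extracts the maximum of an unsorted pool (max + remove) while tracking the remaining target, instead of A's sort-descending pass that re-sums the accumulator list on every step.
import Mathlib
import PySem

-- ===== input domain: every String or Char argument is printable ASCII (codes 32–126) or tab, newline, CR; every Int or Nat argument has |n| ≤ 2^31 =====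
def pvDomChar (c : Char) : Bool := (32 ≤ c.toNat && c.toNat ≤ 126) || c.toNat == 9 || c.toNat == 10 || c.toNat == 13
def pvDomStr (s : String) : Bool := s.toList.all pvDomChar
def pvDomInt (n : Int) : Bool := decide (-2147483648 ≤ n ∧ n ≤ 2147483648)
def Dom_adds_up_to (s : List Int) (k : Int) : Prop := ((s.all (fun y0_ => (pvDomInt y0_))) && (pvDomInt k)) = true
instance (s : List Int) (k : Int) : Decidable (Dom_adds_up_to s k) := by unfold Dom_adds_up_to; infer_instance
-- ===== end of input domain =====

-- B replaces A's sort-descending scan (which re-sums the accumulator each step) by repeated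
-- extract-max from an unsorted pool with a remaining-target counter (objective: alternative).

-- ===== PORT A =====
-- the for-loop over the sorted list, carrying the accumulator `subs`; re-sums `subs ++ [x]` each step like A
def addsUpToLoopA (k : Int) : List Int → List Int → Option (List Int)
  | [], _ => none
  | x :: rest, subs =>
    if (subs ++ [x]).sum < k then addsUpToLoopA k rest (subs ++ [x])
    else if (subs ++ [x]).sum > k then addsUpToLoopA k rest subs
    else some (subs ++ [x])

def adds_up_to (s : List Int) (k : Int) : Option (List Int) :=
  addsUpToLoopA k (PySem.List.sorted (s.filter (fun x => x < k)) (fun x => x) true) []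

-- ===== PORT B =====
-- B's while loop: x = max(pool); pool.remove(x); skip / return / take with remaining target r
def addsUpToLoopB (pool : List Int) (r : Int) (out : List Int) : Option (List Int) :=
  match hm : PySem.List.max? pool (fun x => x) with
  | none => none
  | some x =>
    let pool' := (PySem.List.remove? pool x).getD []   -- remove cannot fail: x = max(pool) ∈ pool
    if x > r then addsUpToLoopB pool' r out
    else if x = r then some (out ++ [x])
    else addsUpToLoopB pool' (r - x) (out ++ [x])
termination_by pool.length
decreasing_by
  all_goals
    simp only [PySem.List.remove?_eq_some_erase pool x (PySem.List.max?_mem hm), Option.getD_some]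
    rw [List.length_erase_of_mem (PySem.List.max?_mem hm)]
    have := List.length_pos_of_mem (PySem.List.max?_mem hm)
    omega

def adds_up_to_alt (s : List Int) (k : Int) : Option (List Int) :=
  addsUpToLoopB (s.filter (fun x => x < k)) k []

-- ===== PRECONDITION & SPEC =====
def Spec_adds_up_to (s : List Int) (k : Int) (out : Option (List Int)) : Prop := out = adds_up_to_alt s k
instance (s : List Int) (k : Int) (out : Option (List Int)) : Decidable (Spec_adds_up_to s k out) := by unfold Spec_adds_up_to; infer_instance

-- ===== CLAIM (what is proved, stated in full; the proofs are below) =====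
def Claim_equal_adds_up_to : Prop := ∀ (s : List Int) (k : Int), Dom_adds_up_to s k → Spec_adds_up_to s k (adds_up_to s k)

-- ===== LEMMAS AND PROOFS =====

-- ideal greedy loop on an already-descending list, with remaining target r
def addsUpToLoopI : List Int → Int → List Int → Option (List Int)
  | [], _, _ => none
  | x :: rest, r, out =>
    if x > r then addsUpToLoopI rest r out
    else if x = r then some (out ++ [x])
    else addsUpToLoopI rest (r - x) (out ++ [x])

theorem loopA_eq_loopI (k : Int) (l : List Int) : ∀ subs : List Int,
    addsUpToLoopA k l subs = addsUpToLoopI l (k - subs.sum) subs := by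
  induction l with
  | nil => intro subs; rfl
  | cons x rest ih =>
    intro subs
    simp only [addsUpToLoopA, addsUpToLoopI, List.sum_append, List.sum_cons, List.sum_nil, add_zero]
    rcases lt_trichotomy (subs.sum + x) k with h | h | h
    · rw [if_pos h, if_neg (by omega), if_neg (by omega), ih]
      simp [List.sum_append]; ring_nf
    · rw [if_neg (by omega), if_neg (by omega), if_neg (by omega), if_pos (by omega)]
    · rw [if_neg (by omega), if_pos h, if_pos (by omega)]; exact ih subs

theorem sortedDesc_eq_reverse (xs : List Int) :
    PySem.List.sorted xs (fun x => x) true = (PySem.List.sorted xs (fun x => x) false).reverse := by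
  have h := PySem.List.sorted_id_eq_of_perm_of_pairwise xs
    (PySem.List.sorted xs (fun x => x) true).reverse
    ((PySem.List.sorted xs (fun x => x) true).reverse_perm.trans
      (PySem.List.sorted_perm xs (fun x => x) true))
    (by
      rw [List.pairwise_reverse]
      exact PySem.List.sorted_pairwise_rev xs (fun x => x))
  rw [h, List.reverse_reverse]

theorem sortedDesc_cons_max {xs : List Int} {m : Int}
    (hm : PySem.List.max? xs (fun x => x) = some m) :
    PySem.List.sorted xs (fun x => x) true = m :: PySem.List.sorted (xs.erase m) (fun x => x) true := by
  have hmem : m ∈ xs := PySem.List.max?_mem hm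
  have hmax : ∀ y ∈ xs, y ≤ m := fun y hy => PySem.List.max?_isMax hm y hy
  have hasc : PySem.List.sorted xs (fun x => x) false
      = PySem.List.sorted (xs.erase m) (fun x => x) false ++ [m] := by
    apply PySem.List.sorted_id_eq_of_perm_of_pairwise
    · exact ((PySem.List.sorted_perm (xs.erase m) (fun x => x) false).append_right [m]).trans
        ((List.perm_append_singleton m (xs.erase m)).trans (List.perm_cons_erase hmem).symm)
    · apply List.pairwise_append.mpr
      refine ⟨PySem.List.sorted_pairwise _ _, List.pairwise_singleton _ _, ?_⟩
      intro a ha b hb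
      rw [List.mem_singleton] at hb
      subst hb
      exact hmax a (List.mem_of_mem_erase ((PySem.List.mem_sorted _ _ _ _).1 ha))
  rw [sortedDesc_eq_reverse, hasc, List.reverse_append, List.reverse_singleton,
    List.singleton_append, ← sortedDesc_eq_reverse]

theorem loopB_eq_loopI : ∀ (n : Nat) (pool : List Int), pool.length ≤ n → ∀ (r : Int) (out : List Int),
    addsUpToLoopB pool r out = addsUpToLoopI (PySem.List.sorted pool (fun x => x) true) r out := by
  intro n
  induction n with
  | zero =>
    intro pool hp r out
    have h : pool = [] := List.eq_nil_of_length_eq_zero (Nat.le_zero.mp hp)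
    subst h
    rw [addsUpToLoopB]
    rfl
  | succ n ih =>
    intro pool hp r out
    match hm : PySem.List.max? pool (fun x => x) with
    | none =>
      have h : pool = [] := (PySem.List.max?_eq_none_iff _ _).1 hm
      subst h
      rw [addsUpToLoopB]
      rfl
    | some m =>
      have hmem : m ∈ pool := PySem.List.max?_mem hm
      have herase : (PySem.List.remove? pool m).getD [] = pool.erase m := by
        rw [PySem.List.remove?_eq_some_erase pool m hmem, Option.getD_some]
      have hlen : (pool.erase m).length ≤ n := by
        rw [List.length_erase_of_mem hmem]
        omega
      rw [addsUpToLoopB, hm]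
      simp only [herase]
      rw [sortedDesc_cons_max hm]
      simp only [addsUpToLoopI]
      split_ifs with h1 h2
      · exact ih _ hlen r out
      · rfl
      · exact ih _ hlen (r - m) (out ++ [m])

-- ===== VERDICT (by name: the statement is the Claim_ definition above) =====
theorem adds_up_to_spec : Claim_equal_adds_up_to := by
  intro s k _
  unfold Spec_adds_up_to adds_up_to adds_up_to_alt
  rw [loopA_eq_loopI, loopB_eq_loopI (s.filter (fun x => x < k)).length _ le_rfl]
  simp
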